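-- pv_equiv track=rewrite | github.com/BENBI2024/Wan-tts3-original-v2.0-elevenlabsready | backend/services/tts_service.py | _extract_json_strings
-- ===== SOURCE A (Python) =====
-- def _extract_json_strings(text: str) -> list:
--     """从文本中提取所有JSON对象"""
--     result = []
--     depth = 0
--     start = -1
--     in_str = False
--     escape = False
--
--     for i, ch in enumerate(text):
--         if in_str:
--             if escape:
--                 escape = False
--             elif ch == '\\':
--                 escape = True
--             elif ch == '"':
--                 in_str = False
--             continue
--
--         if ch == '"':
--             in_str = True
--             continue
--
--         if ch == '{':
--             if depth == 0:
--                 start = i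
--             depth += 1
--         elif ch == '}':
--             if depth > 0:
--                 depth -= 1
--             if depth == 0 and start != -1:
--                 result.append(text[start:i + 1])
--                 start = -1
--
--     return result
-- ===== SOURCE B (Python) =====
-- def _extract_json_strings(text: str) -> list:
--     # Pass 1: mark every character that belongs to string-literal handling
--     # (the opening quote and everything up to and including the closing quote).
--     mask = []
--     in_str = False
--     escape = False
--     for ch in text:
--         if in_str:
--             mask.append(True)
--             if escape:
--                 escape = False
--             elif ch == '\\':
--                 escape = True
--             elif ch == '"':
--                 in_str = False
--         elif ch == '"':
--             mask.append(True)
--             in_str = True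
--         else:
--             mask.append(False)
--     # Pass 2: plain brace matching over the unmasked characters.
--     result = []
--     depth = 0
--     start = 0
--     for i, ch in enumerate(text):
--         if mask[i]:
--             continue
--         if ch == '{':
--             if depth == 0:
--                 start = i
--             depth += 1
--         elif ch == '}' and depth > 0:
--             depth -= 1
--             if depth == 0:
--                 result.append(text[start:i + 1])
--     return result
-- ===== Notes on version B (the rewrite author's own statement) =====
-- stated objective: alternative
-- what changed: Splits A's single stateful scan into two passes: first a mask of in-string-literal positions, then sentinel-free brace matching that consults the mask; the -1 start sentinel and the inline in_str/escape tracking disappear from the matching loop.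
import Mathlib
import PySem

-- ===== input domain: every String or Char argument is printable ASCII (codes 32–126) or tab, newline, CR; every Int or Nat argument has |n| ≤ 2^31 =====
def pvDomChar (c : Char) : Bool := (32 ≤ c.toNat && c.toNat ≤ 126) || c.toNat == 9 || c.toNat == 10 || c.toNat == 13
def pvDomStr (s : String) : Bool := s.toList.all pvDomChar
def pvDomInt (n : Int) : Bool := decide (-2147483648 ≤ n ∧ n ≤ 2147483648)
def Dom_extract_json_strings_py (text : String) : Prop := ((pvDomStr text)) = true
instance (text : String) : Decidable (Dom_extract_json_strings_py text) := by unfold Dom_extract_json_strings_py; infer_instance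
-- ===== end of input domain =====

-- B splits A's single stateful scan into two passes (a string-literal mask, then
-- sentinel-free brace matching); same return value, proved equal on all inputs.

-- ===== PORT A =====
-- Literal port of A's loop: state (result, depth, start, in_str, escape), index i.
-- text[start:i+1] with 0 ≤ start ≤ i is exactly (drop start).take (i+1-start);
-- start.toNat is taken only under the guard start ≠ -1 (then 0 ≤ start holds).
def aGo (all : List Char) : List Char → Nat → List String → Int → Int → Bool → Bool → List String
  | [], _, res, _, _, _, _ => res
  | ch :: rest, i, res, depth, start, in_str, escape =>
    if in_str then
      if escape then aGo all rest (i+1) res depth start in_str false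
      else if ch = '\\' then aGo all rest (i+1) res depth start in_str true
      else if ch = '"' then aGo all rest (i+1) res depth start false escape
      else aGo all rest (i+1) res depth start in_str escape
    else if ch = '"' then aGo all rest (i+1) res depth start true escape
    else if ch = '{' then
      let start' := if depth = 0 then (i : Int) else start
      aGo all rest (i+1) res (depth + 1) start' in_str escape
    else if ch = '}' then
      let depth' := if depth > 0 then depth - 1 else depth
      if depth' = 0 ∧ start ≠ -1 then
        aGo all rest (i+1) (res ++ [String.mk ((all.drop start.toNat).take (i + 1 - start.toNat))]) depth' (-1) in_str escape
      else aGo all rest (i+1) res depth' start in_str escape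
    else aGo all rest (i+1) res depth start in_str escape

def extract_json_strings_py (text : String) : List String :=
  aGo text.toList text.toList 0 [] 0 (-1) false false

-- ===== PORT B =====
-- Pass 1 of Source B: the mask of characters consumed by string-literal handling.
def bMask : List Char → Bool → Bool → List Bool
  | [], _, _ => []
  | ch :: rest, in_str, escape =>
    if in_str then
      true :: (if escape then bMask rest in_str false
               else if ch = '\\' then bMask rest in_str true
               else if ch = '"' then bMask rest false escape
               else bMask rest in_str escape)
    else if ch = '"' then true :: bMask rest true escape
    else false :: bMask rest in_str escape

-- Pass 2 of Source B: brace matching over (char, mask) pairs; no -1 sentinel.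
def bGo (all : List Char) : List (Char × Bool) → Nat → List String → Int → Nat → List String
  | [], _, res, _, _ => res
  | (ch, m) :: rest, i, res, depth, start =>
    if m then bGo all rest (i+1) res depth start
    else if ch = '{' then
      bGo all rest (i+1) res (depth + 1) (if depth = 0 then i else start)
    else if ch = '}' ∧ depth > 0 then
      if depth - 1 = 0 then
        bGo all rest (i+1) (res ++ [String.mk ((all.drop start).take (i + 1 - start))]) (depth - 1) start
      else bGo all rest (i+1) res (depth - 1) start
    else bGo all rest (i+1) res depth start

def extract_json_strings_py_alt (text : String) : List String :=
  let all := text.toList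
  bGo all (all.zip (bMask all false false)) 0 [] 0 0

-- ===== PRECONDITION & SPEC =====
def Spec_extract_json_strings_py (text : String) (out : List String) : Prop := out = extract_json_strings_py_alt text
instance (text : String) (out : List String) : Decidable (Spec_extract_json_strings_py text out) := by unfold Spec_extract_json_strings_py; infer_instance

-- ===== CLAIM (what is proved, stated in full; the proofs are below) =====
def Claim_equal_extract_json_strings_py : Prop := ∀ (text : String), Dom_extract_json_strings_py text → Spec_extract_json_strings_py text (extract_json_strings_py text)

-- ===== LEMMAS AND PROOFS =====

-- Loop correspondence: A's fused scan equals B's mask-then-match, under the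
-- invariant that A's start is -1 exactly at depth 0 and otherwise equals B's start.
theorem aGo_eq_bGo (all : List Char) :
    ∀ (cs : List Char) (i : Nat) (res : List String) (depth start : Int) (bstart : Nat)
      (in_str escape : Bool),
      0 ≤ depth →
      (depth = 0 → start = -1) →
      (0 < depth → 0 ≤ start ∧ start.toNat = bstart) →
      aGo all cs i res depth start in_str escape
        = bGo all (cs.zip (bMask cs in_str escape)) i res depth bstart := by
  intro cs
  induction cs with
  | nil => intros; simp [aGo, bMask, bGo]
  | cons ch rest ih =>
    intro i res depth start bstart in_str escape hd h0 hp
    by_cases hin : in_str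
    · by_cases hesc : escape
      · simp [aGo, bMask, bGo, hin, hesc]; exact ih _ _ _ _ _ _ _ hd h0 hp
      · by_cases hbs : ch = '\\'
        · simp [aGo, bMask, bGo, hin, hesc, hbs]; exact ih _ _ _ _ _ _ _ hd h0 hp
        · by_cases hq : ch = '"'
          · simp [aGo, bMask, bGo, hin, hesc, hbs, hq]; exact ih _ _ _ _ _ _ _ hd h0 hp
          · simp [aGo, bMask, bGo, hin, hesc, hbs, hq]; exact ih _ _ _ _ _ _ _ hd h0 hp
    · by_cases hq : ch = '"'
      · simp [aGo, bMask, bGo, hin, hq]; exact ih _ _ _ _ _ _ _ hd h0 hp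
      · by_cases hob : ch = '{'
        · by_cases hd0 : depth = 0
          · simp [aGo, bMask, bGo, hin, hq, hob, hd0]
            exact ih _ _ _ _ _ _ _ (by omega) (by omega) (fun _ => by simp)
          · simp [aGo, bMask, bGo, hin, hq, hob, hd0]
            exact ih _ _ _ _ _ _ _ (by omega) (by omega)
              (fun _ => hp (by omega))
        · by_cases hcb : ch = '}'
          · by_cases hdp : 0 < depth
            · obtain ⟨hs0, hsb⟩ := hp hdp
              by_cases hd1 : depth - 1 = 0
              · have hsne : start ≠ -1 := by omega
                simp [aGo, bMask, bGo, hin, hq, hob, hcb, hdp, hd1, hsne, hsb]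
                exact ih _ _ _ _ _ _ _ (by omega) (fun _ => rfl) (by omega)
              · have : ¬ (depth - 1 = 0 ∧ start ≠ -1) := by tauto
                simp [aGo, bMask, bGo, hin, hq, hob, hcb, hdp, hd1, this]
                exact ih _ _ _ _ _ _ _ (by omega) (by omega) (fun _ => ⟨hs0, hsb⟩)
            · have hd0 : depth = 0 := by omega
              have hs : start = -1 := h0 hd0
              simp [aGo, bMask, bGo, hin, hcb, hdp, hd0, hs]
              exact ih _ _ _ _ _ _ _ le_rfl (fun _ => rfl) (by omega)
          · simp [aGo, bMask, bGo, hin, hq, hob, hcb]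
            exact ih _ _ _ _ _ _ _ hd h0 hp

-- ===== VERDICT (by name: the statement is the Claim_ definition above) =====
theorem extract_json_strings_py_spec : Claim_equal_extract_json_strings_py := by
  intro text _
  unfold Spec_extract_json_strings_py extract_json_strings_py extract_json_strings_py_alt
  exact aGo_eq_bGo _ _ 0 [] 0 (-1) 0 false false le_rfl (fun _ => rfl) (by omega)
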